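-- pv_equiv track=rewrite | github.com/INHA-Algorithm/Algorithm-study | 김창성/구현/상어 초등학교-21608.py | countLikedStudent
-- ===== SOURCE A (Python) =====
-- def countLikedStudent(N, classSeat, key, likedStudentArray):
--     maxCount = 0
--     maxCountSeat = []
--
--     for i in range(N):
--         for j in range(N):
--             likedStudentNum = 0
--
--             if classSeat[i][j] == 0:
--                 for dx, dy in [(0,-1),(-1,0),(0,1),(1,0)]:
--                     nx, ny = i+dx, j+dy
--
--                     if N > nx >= 0 and N > ny >= 0:
--                         if classSeat[nx][ny] in likedStudentArray[key]:
--                             likedStudentNum += 1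
--
--                 if likedStudentNum > maxCount:
--                     maxCount = likedStudentNum
--                     maxCountSeat = []
--                     maxCountSeat.append((i,j))
--                 elif likedStudentNum == maxCount:
--                     maxCountSeat.append((i,j))
--
--     return maxCountSeat
-- ===== SOURCE B (Python) =====
-- def countLikedStudent(N, classSeat, key, likedStudentArray):
--     liked = set(likedStudentArray.get(key, ()))
--     counts = [
--         (sum(1 for x, y in ((i - 1, j), (i + 1, j), (i, j - 1), (i, j + 1))
--              if 0 <= x < N and 0 <= y < N and classSeat[x][y] in liked),
--          (i, j))
--         for i in range(N) for j in range(N)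
--         if classSeat[i][j] == 0
--     ]
--     best = max((c for c, _ in counts), default=0)
--     return [seat for c, seat in counts if c == best]
-- ===== Notes on version B (the rewrite author's own statement) =====
-- stated objective: alternative
-- what changed: A's single pass with a running max that resets the result list is replaced by a two-pass selection: build the full (count, seat) table (counting via a set of liked students and a filtered neighbour list), take the maximum with default 0, then filter the seats attaining it. B's dict lookup is tolerant (.get(key, ())), so where A raises KeyError B returns the region's empty seats.
import Mathlib
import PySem

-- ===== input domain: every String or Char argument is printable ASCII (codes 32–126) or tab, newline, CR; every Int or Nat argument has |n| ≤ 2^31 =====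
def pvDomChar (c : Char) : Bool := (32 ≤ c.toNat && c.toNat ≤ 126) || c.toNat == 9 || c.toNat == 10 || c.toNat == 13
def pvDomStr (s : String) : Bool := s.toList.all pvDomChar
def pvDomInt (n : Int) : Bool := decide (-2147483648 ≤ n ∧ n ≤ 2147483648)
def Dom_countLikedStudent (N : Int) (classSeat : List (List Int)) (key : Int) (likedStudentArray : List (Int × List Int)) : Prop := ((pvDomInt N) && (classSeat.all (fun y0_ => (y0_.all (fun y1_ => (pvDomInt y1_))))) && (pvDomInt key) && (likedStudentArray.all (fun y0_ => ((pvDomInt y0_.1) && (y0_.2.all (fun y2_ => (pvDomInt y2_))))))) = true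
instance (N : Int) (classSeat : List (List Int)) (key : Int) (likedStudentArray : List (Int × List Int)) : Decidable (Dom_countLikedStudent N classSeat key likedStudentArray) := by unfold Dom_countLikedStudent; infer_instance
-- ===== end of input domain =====

-- B replaces A's running-max-with-reset single pass by a build-count-table / take-max / filter
-- two-pass selection with a set for the liked lookup; objective: alternative decomposition (not faster).

-- shared cell access: classSeat[x][y] (total form; exact under Pre_'s bounds)
def pvCell (classSeat : List (List Int)) (x y : Int) : Int :=
  PySem.List.pyGetD (PySem.List.pyGetD classSeat x []) y 0

-- likedStudentArray[key] (dict lookup; exact under Pre_'s key-present condition)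
def pvLiked (likedStudentArray : List (Int × List Int)) (key : Int) : List Int :=
  ((PySem.Dict.mk likedStudentArray).get? key).getD []

-- ===== PORT A =====
def countLikedStudent (N : Int) (classSeat : List (List Int)) (key : Int) (likedStudentArray : List (Int × List Int)) : List (Int × Int) :=
  let res := (PySem.List.pyRange 0 N 1).foldl (fun st i =>
    (PySem.List.pyRange 0 N 1).foldl (fun st j =>
      if pvCell classSeat i j = 0 then
        let likedStudentNum : Int :=
          ([((0:Int), (-1:Int)), (-1, 0), (0, 1), (1, 0)]).foldl (fun acc d =>
            let nx := i + d.1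
            let ny := j + d.2
            if N > nx ∧ nx ≥ 0 ∧ N > ny ∧ ny ≥ 0 then
              if pvCell classSeat nx ny ∈ pvLiked likedStudentArray key then acc + 1 else acc
            else acc) 0
        if likedStudentNum > st.1 then (likedStudentNum, [(i, j)])
        else if likedStudentNum = st.1 then (st.1, st.2 ++ [(i, j)])
        else st
      else st) st) ((0 : Int), ([] : List (Int × Int)))
  res.2

-- ===== PORT B =====
-- sum(1 for (x,y) in neighbours if in-bounds and liked) = length of the filtered neighbour list
def pvNbrCount (N : Int) (classSeat : List (List Int)) (liked : PySem.Set Int) (i j : Int) : Int :=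
  ((([(i - 1, j), (i + 1, j), (i, j - 1), (i, j + 1)] : List (Int × Int)).filter (fun p =>
      decide (0 ≤ p.1 ∧ p.1 < N ∧ 0 ≤ p.2 ∧ p.2 < N ∧ pvCell classSeat p.1 p.2 ∈ liked))).length : Int)

def countLikedStudent_alt (N : Int) (classSeat : List (List Int)) (key : Int) (likedStudentArray : List (Int × List Int)) : List (Int × Int) :=
  let liked : PySem.Set Int := PySem.Set.ofList (pvLiked likedStudentArray key)
  let counts : List (Int × (Int × Int)) :=
    (PySem.List.pyRange 0 N 1).flatMap (fun i =>
      (PySem.List.pyRange 0 N 1).filterMap (fun j =>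
        if pvCell classSeat i j = 0 then some (pvNbrCount N classSeat liked i j, (i, j)) else none))
  let best : Int := (PySem.List.max? (counts.map Prod.fst) (fun c => c)).getD 0
  (counts.filter (fun c => decide (c.1 = best))).map Prod.snd

-- ===== PRECONDITION & SPEC =====
-- Pre_ excludes exactly the inputs where Python A raises: IndexError when the first N rows /
-- columns are shorter than N, and KeyError when the dict lookup is actually reached (N ≥ 2 and
-- some empty seat in the N×N region) with a missing key.
def Pre_countLikedStudent (N : Int) (classSeat : List (List Int)) (key : Int) (likedStudentArray : List (Int × List Int)) : Prop :=
  (N.toNat ≤ classSeat.length ∧ ∀ r ∈ classSeat.take N.toNat, N.toNat ≤ r.length) ∧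
  (2 ≤ N → (∃ r ∈ classSeat.take N.toNat, (0 : Int) ∈ r.take N.toNat) →
    key ∈ likedStudentArray.map Prod.fst)
instance (N : Int) (classSeat : List (List Int)) (key : Int) (likedStudentArray : List (Int × List Int)) : Decidable (Pre_countLikedStudent N classSeat key likedStudentArray) := by unfold Pre_countLikedStudent; infer_instance

def pvWitness_countLikedStudent : Int × List (List Int) × Int × (List (Int × List Int)) :=
  (2, [[0, 1], [3, 0]], 5, [(5, [1, 3])])

def Spec_countLikedStudent (N : Int) (classSeat : List (List Int)) (key : Int) (likedStudentArray : List (Int × List Int)) (out : List (Int × Int)) : Prop := out = countLikedStudent_alt N classSeat key likedStudentArray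
instance (N : Int) (classSeat : List (List Int)) (key : Int) (likedStudentArray : List (Int × List Int)) (out : List (Int × Int)) : Decidable (Spec_countLikedStudent N classSeat key likedStudentArray out) := by unfold Spec_countLikedStudent; infer_instance

-- ===== CLAIM (what is proved, stated in full; the proofs are below) =====
def Claim_equal_countLikedStudent : Prop := ∀ (N : Int) (classSeat : List (List Int)) (key : Int) (likedStudentArray : List (Int × List Int)), Dom_countLikedStudent N classSeat key likedStudentArray → Pre_countLikedStudent N classSeat key likedStudentArray → Spec_countLikedStudent N classSeat key likedStudentArray (countLikedStudent N classSeat key likedStudentArray)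

-- ===== LEMMAS AND PROOFS =====

-- 0/1 indicator of "in-bounds liked neighbour", shared normal form of both counts
def pvInd (N : Int) (classSeat : List (List Int)) (lk : List Int) (p : Int × Int) : Int :=
  if 0 ≤ p.1 ∧ p.1 < N ∧ 0 ≤ p.2 ∧ p.2 < N ∧ pvCell classSeat p.1 p.2 ∈ PySem.Set.ofList lk then 1 else 0

theorem pv_stepA (N : Int) (classSeat : List (List Int)) (lk : List Int) (c x y : Int) :
    (if N > x ∧ x ≥ 0 ∧ N > y ∧ y ≥ 0 then
      (if pvCell classSeat x y ∈ lk then c + 1 else c) else c)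
    = c + pvInd N classSeat lk (x, y) := by
  simp only [pvInd, PySem.Set.mem_ofList]
  split_ifs with h1 h2 h3 h4 <;>
    first
      | omega
      | exact absurd ⟨h1.2.1, h1.1, h1.2.2.2, h1.2.2.1, h2⟩ h3
      | exact absurd h4.2.2.2.2 h2

theorem pv_cnt_eq (N : Int) (classSeat : List (List Int)) (lk : List Int) (i j : Int) :
    (([((0:Int), (-1:Int)), (-1, 0), (0, 1), (1, 0)]).foldl (fun acc d =>
        let nx := i + d.1
        let ny := j + d.2
        if N > nx ∧ nx ≥ 0 ∧ N > ny ∧ ny ≥ 0 then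
          if pvCell classSeat nx ny ∈ lk then acc + 1 else acc
        else acc) 0)
    = pvNbrCount N classSeat (PySem.Set.ofList lk) i j := by
  have hsum := PySem.List.sum_map_ite_one_zero
    (fun p : Int × Int => decide (0 ≤ p.1 ∧ p.1 < N ∧ 0 ≤ p.2 ∧ p.2 < N ∧ pvCell classSeat p.1 p.2 ∈ PySem.Set.ofList lk))
    ([(i - 1, j), (i + 1, j), (i, j - 1), (i, j + 1)] : List (Int × Int))
  rw [List.countP_eq_length_filter] at hsum
  simp only [List.foldl_cons, List.foldl_nil, pvNbrCount, ← hsum, List.map_cons, List.map_nil,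
    List.sum_cons, List.sum_nil, pv_stepA, decide_eq_true_eq]
  have e1 : i + (0:Int) = i := by ring
  have e2 : j + (-1:Int) = j - 1 := by ring
  have e3 : i + (-1:Int) = i - 1 := by ring
  have e4 : j + (0:Int) = j := by ring
  rw [e1, e2, e3, e4]
  simp only [pvInd]
  ring_nf

-- argmax-with-reset step of A
def pvStep (st : Int × List (Int × Int)) (c : Int × (Int × Int)) : Int × List (Int × Int) :=
  if c.1 > st.1 then (c.1, [c.2]) else if c.1 = st.1 then (st.1, st.2 ++ [c.2]) else st

def pvMaxF (L : List (Int × (Int × Int))) (m : Int) : Int := L.foldl (fun a c => max a c.1) m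

theorem pv_le_maxF (L : List (Int × (Int × Int))) : ∀ m : Int, m ≤ pvMaxF L m := by
  induction L with
  | nil => intro m; simp [pvMaxF]
  | cons a t ih => intro m; exact le_trans (le_max_left m a.1) (ih (max m a.1))

theorem pv_fold_step (L : List (Int × (Int × Int))) : ∀ (m : Int) (s : List (Int × Int)),
    L.foldl pvStep (m, s) = (pvMaxF L m,
      (if m = pvMaxF L m then s else []) ++
        (L.filter (fun c => decide (c.1 = pvMaxF L m))).map Prod.snd) := by
  induction L with
  | nil => intro m s; simp [pvMaxF]
  | cons a t ih =>
    intro m s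
    have hM : pvMaxF (a :: t) m = pvMaxF t (max m a.1) := rfl
    rw [List.foldl_cons, hM]
    by_cases h1 : a.1 > m
    · have hmax : max m a.1 = a.1 := max_eq_right (le_of_lt h1)
      have hle := pv_le_maxF t (max m a.1)
      have hmne : ¬ (m = pvMaxF t (max m a.1)) := by omega
      have hstep : pvStep (m, s) a = (a.1, [a.2]) := by simp [pvStep, h1]
      rw [hstep, if_neg hmne, hmax]
      rw [ih a.1 [a.2], List.filter_cons]
      by_cases h2 : a.1 = pvMaxF t a.1
      · rw [if_pos h2, show decide (a.1 = pvMaxF t a.1) = true from decide_eq_true h2]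
        simp
      · rw [if_neg h2, show decide (a.1 = pvMaxF t a.1) = false from decide_eq_false h2]
        simp
    · by_cases h2 : a.1 = m
      · have hmax : max m a.1 = m := by omega
        have hstep : pvStep (m, s) a = (m, s ++ [a.2]) := by simp [pvStep, h2]
        rw [hstep, hmax, ih m (s ++ [a.2]), List.filter_cons]
        by_cases h3 : m = pvMaxF t m
        · rw [if_pos h3, if_pos h3,
            show decide (a.1 = pvMaxF t m) = true from decide_eq_true (by omega)]
          simp
        · rw [if_neg h3, if_neg h3,
            show decide (a.1 = pvMaxF t m) = false from decide_eq_false (by omega)]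
          simp
      · have hmax : max m a.1 = m := by omega
        have hane : ¬ (a.1 = pvMaxF t m) := by
          have := pv_le_maxF t m; omega
        have hstep : pvStep (m, s) a = (m, s) := by simp [pvStep, h1, h2]
        rw [hstep, hmax, ih m s, List.filter_cons,
          show (decide (a.1 = pvMaxF t m)) = false from decide_eq_false hane]
        simp

theorem pv_foldl_filterMap {A B C : Type} (f : A → Option B) (g : C → B → C) (l : List A) (init : C) :
    (l.filterMap f).foldl g init
      = l.foldl (fun x y => match f y with | some b => g x b | none => x) init := by
  induction l generalizing init with
  | nil => rfl
  | cons a t ih => cases h : f a <;> simp [h, ih]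

theorem pv_best_eq (counts : List (Int × (Int × Int))) (h : ∀ c ∈ counts, 0 ≤ c.1) :
    (PySem.List.max? (counts.map Prod.fst) (fun c => c)).getD 0 = pvMaxF counts 0 := by
  cases counts with
  | nil =>
    rw [List.map_nil, (PySem.List.max?_eq_none_iff _ _).mpr rfl]
    rfl
  | cons c0 t =>
    rw [List.map_cons, PySem.List.max?_id_cons, Option.getD_some, List.foldl_map]
    have h0 : max (0:Int) c0.1 = c0.1 := max_eq_right (h c0 (by simp))
    show _ = List.foldl (fun a c => max a c.1) (max 0 c0.1) t
    rw [h0]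

-- ===== VERDICT (by name: the statement is the Claim_ definition above) =====
theorem countLikedStudent_spec : Claim_equal_countLikedStudent := by
  intro N classSeat key likedStudentArray _ _
  unfold Spec_countLikedStudent countLikedStudent countLikedStudent_alt
  dsimp only
  set lk := pvLiked likedStudentArray key with hlk
  set counts : List (Int × (Int × Int)) :=
    (PySem.List.pyRange 0 N 1).flatMap (fun i =>
      (PySem.List.pyRange 0 N 1).filterMap (fun j =>
        if pvCell classSeat i j = 0 then
          some (pvNbrCount N classSeat (PySem.Set.ofList lk) i j, (i, j)) else none)) with hcounts
  have hnn : ∀ c ∈ counts, 0 ≤ c.1 := by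
    intro c hc
    rw [hcounts] at hc
    simp only [List.mem_flatMap, List.mem_filterMap] at hc
    obtain ⟨i, _, j, _, heq⟩ := hc
    by_cases h : pvCell classSeat i j = 0
    · rw [if_pos h, Option.some.injEq] at heq
      rw [← heq]
      exact Int.natCast_nonneg _
    · rw [if_neg h] at heq; exact absurd heq (by simp)
  have hA : (PySem.List.pyRange 0 N 1).foldl (fun st i =>
      (PySem.List.pyRange 0 N 1).foldl (fun st j =>
        if pvCell classSeat i j = 0 then
          let likedStudentNum : Int :=
            ([((0:Int), (-1:Int)), (-1, 0), (0, 1), (1, 0)]).foldl (fun acc d =>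
              let nx := i + d.1
              let ny := j + d.2
              if N > nx ∧ nx ≥ 0 ∧ N > ny ∧ ny ≥ 0 then
                if pvCell classSeat nx ny ∈ lk then acc + 1 else acc
              else acc) 0
          if likedStudentNum > st.1 then (likedStudentNum, [(i, j)])
          else if likedStudentNum = st.1 then (st.1, st.2 ++ [(i, j)])
          else st
        else st) st) ((0 : Int), ([] : List (Int × Int)))
      = counts.foldl pvStep ((0 : Int), ([] : List (Int × Int))) := by
    rw [hcounts, List.foldl_flatMap]
    congr 1
    funext acc i
    rw [pv_foldl_filterMap]
    congr 1
    funext st j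
    by_cases h : pvCell classSeat i j = 0
    · simp only [h, if_true, pv_cnt_eq, pvStep]
    · simp only [h, if_false]
  rw [hA, pv_fold_step counts 0 []]
  simp only [pv_best_eq counts hnn, ite_self, List.nil_append]
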